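-- pv_equiv track=rewrite | github.com/JoyelTheDev/MSPScanner-GUI-Eng | Gui/PortsRangeGui.py | resize_data
-- ===== SOURCE A (Python) =====
-- from typing import List
--
-- def resize_data(data: List[int], counts: int) -> List[int]:
--     data_2d: List[List[int]] = []
--     group_size = len(data) // counts
--     for i in range(counts - 1):
--         data_2d.append(data[i * group_size:(i + 1) * group_size])
--     data_2d.append(data[(counts - 1) * group_size:])
--     data_resized: List[int] = [sum(i) for i in data_2d]
--     return data_resized
-- ===== SOURCE B (Python) =====
-- def resize_data(data, counts):
--     group_size = len(data) // counts
--     pre = [0]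
--     for x in data:
--         pre.append(pre[-1] + x)
--     result = []
--     for i in range(counts - 1):
--         result.append(pre[(i + 1) * group_size] - pre[i * group_size])
--     result.append(pre[len(data)] - pre[(counts - 1) * group_size])
--     return result
-- ===== Notes on version B (the rewrite author's own statement) =====
-- stated objective: alternative
-- what changed: B replaces A's build-a-2D-list-of-slices-then-sum-each with a single prefix-sum table and a boundary-difference pass over the group indices.
-- outside the precondition, e.g. on resize_data([1, 2, 3], -1): A returns [0], B raises IndexError; on resize_data([1], -2): A returns [0], B raises IndexError
import Mathlib
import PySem

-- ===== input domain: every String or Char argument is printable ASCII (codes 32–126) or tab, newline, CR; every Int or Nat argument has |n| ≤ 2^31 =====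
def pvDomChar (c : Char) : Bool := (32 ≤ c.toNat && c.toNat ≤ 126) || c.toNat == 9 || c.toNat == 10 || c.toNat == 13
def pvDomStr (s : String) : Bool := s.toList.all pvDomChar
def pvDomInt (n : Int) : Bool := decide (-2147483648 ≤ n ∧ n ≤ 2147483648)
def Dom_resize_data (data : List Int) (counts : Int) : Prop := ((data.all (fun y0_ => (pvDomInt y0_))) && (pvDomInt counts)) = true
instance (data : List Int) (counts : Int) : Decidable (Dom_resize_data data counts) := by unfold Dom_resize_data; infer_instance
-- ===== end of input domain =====

-- B computes each group sum as a difference of prefix sums instead of materialising the slices; alternative decomposition, same cost.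


-- ===== PORT A =====
def resize_data (data : List Int) (counts : Int) : List Int :=
  let group_size := PySem.Int.floordiv (PySem.List.len data) counts
  let data_2d := (PySem.List.pyRange 0 (counts - 1) 1).foldl
    (fun acc i => acc ++ [PySem.List.slice data (some (i * group_size)) (some ((i + 1) * group_size))]) []
  let data_2d := data_2d ++ [PySem.List.slice data (some ((counts - 1) * group_size)) none]
  data_2d.map (fun g => g.sum)

-- ===== PORT B =====
-- pre[-1] / pre[k] are in range on every input Pre_ admits; pyGetD's default is never read there.
def resize_data_alt (data : List Int) (counts : Int) : List Int :=
  let group_size := PySem.Int.floordiv (PySem.List.len data) counts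
  let pre := data.foldl (fun acc x => acc ++ [PySem.List.pyGetD acc (-1) 0 + x]) [0]
  let result := (PySem.List.pyRange 0 (counts - 1) 1).foldl
    (fun acc i => acc ++ [PySem.List.pyGetD pre ((i + 1) * group_size) 0 - PySem.List.pyGetD pre (i * group_size) 0]) []
  result ++ [PySem.List.pyGetD pre (PySem.List.len data) 0 - PySem.List.pyGetD pre ((counts - 1) * group_size) 0]

-- ===== PRECONDITION & SPEC =====
-- Pre_ excludes counts == 0, where A raises ZeroDivisionError, and negative counts with nonempty
-- data, a corner where A's single-element result [sum of a wrapped-around slice] is an accident of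
-- negative slice-index arithmetic and B's prefix-sum indexing raises IndexError.
def Pre_resize_data (data : List Int) (counts : Int) : Prop :=
  0 < counts ∨ (counts < 0 ∧ data = [])
instance (data : List Int) (counts : Int) : Decidable (Pre_resize_data data counts) := by
  unfold Pre_resize_data; infer_instance
def pvWitness_resize_data : List Int × Int := ([1, 2, 3], 2)

def Spec_resize_data (data : List Int) (counts : Int) (out : List Int) : Prop := out = resize_data_alt data counts
instance (data : List Int) (counts : Int) (out : List Int) : Decidable (Spec_resize_data data counts out) := by unfold Spec_resize_data; infer_instance

-- ===== CLAIM (what is proved, stated in full; the proofs are below) =====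
def Claim_equal_resize_data : Prop := ∀ (data : List Int) (counts : Int), Dom_resize_data data counts → Pre_resize_data data counts → Spec_resize_data data counts (resize_data data counts)

-- ===== LEMMAS AND PROOFS =====

-- the prefix-sum table B builds, characterised entry by entry
lemma pre_build (l : List Int) (acc : List Int) (x : Int) :
    l.foldl (fun a y => a ++ [PySem.List.pyGetD a (-1) 0 + y]) (acc ++ [x])
      = acc ++ [x] ++ (List.range l.length).map (fun k => x + (l.take (k + 1)).sum) := by
  induction l generalizing acc x with
  | nil => simp
  | cons y t ih =>
      simp only [List.foldl_cons, PySem.List.pyGetD_neg_one_append_singleton]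
      rw [ih (acc ++ [x]) (x + y)]
      simp [List.range_succ_eq_map, List.map_map, Function.comp, add_assoc]

lemma pre_getD (l : List Int) (k : Nat) (hk : k ≤ l.length) :
    (l.foldl (fun a y => a ++ [PySem.List.pyGetD a (-1) 0 + y]) [0]).getD k 0
      = (l.take k).sum := by
  have h := pre_build l [] 0
  simp only [List.nil_append] at h
  rw [h]
  cases k with
  | zero => simp
  | succ k =>
      have hk' : k < l.length := by omega
      simp [List.getD, List.getElem?_cons_succ, List.getElem?_map, List.getElem?_range hk']

-- sum of a Python slice with Nat bounds a ≤ b, as a difference of prefix sums (no length bound needed)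
lemma sum_slice (l : List Int) (a b : Nat) (hab : a ≤ b) :
    (PySem.List.slice l (some (a : Int)) (some (b : Int))).sum
      = (l.take b).sum - (l.take a).sum := by
  rw [PySem.List.slice_natCast]
  have h1 : (l.drop a).take (b - a) = (l.take b).drop a := by
    rw [List.drop_take]
  have h2 : (l.take b).take a ++ (l.take b).drop a = l.take b := List.take_append_drop _ _
  have h3 : (l.take b).take a = l.take a := by
    rw [List.take_take]
    congr 1
    omega
  have := congrArg List.sum h2
  rw [List.sum_append, h3] at this
  rw [h1]
  omega

lemma sum_drop (l : List Int) (a : Nat) :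
    (l.drop a).sum = l.sum - (l.take a).sum := by
  have := congrArg List.sum (List.take_append_drop a l)
  rw [List.sum_append] at this
  omega

-- ===== VERDICT (by name: the statement is the Claim_ definition above) =====
theorem resize_data_spec : Claim_equal_resize_data := by
  intro data counts _ hpre
  unfold Spec_resize_data resize_data resize_data_alt
  rcases hpre with hpos | ⟨hneg, hdata⟩
  · -- counts > 0
    simp only [PySem.List.len_eq, PySem.List.foldl_append_singleton_eq_map, List.nil_append]
    set g : Int := PySem.Int.floordiv (data.length : Int) counts with hg
    set pre : List Int := data.foldl (fun acc x => acc ++ [PySem.List.pyGetD acc (-1) 0 + x]) [0] with hpredef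
    have hg0 : 0 ≤ g := by
      rw [hg, PySem.Int.floordiv_eq_ediv_of_pos hpos]
      exact Int.ediv_nonneg (by positivity) (by omega)
    have hgc : counts * g ≤ (data.length : Int) := by
      have h := (PySem.Int.le_floordiv_iff_mul_le (a := (data.length : Int)) (b := counts) (q := g) hpos).1 (le_of_eq hg)
      nlinarith
    have hpren : ∀ (k : Nat), k ≤ data.length → PySem.List.pyGetD pre (k : Int) 0 = (data.take k).sum := by
      intro k hk
      rw [hpredef, PySem.List.pyGetD_natCast]
      exact pre_getD data k hk
    rw [List.map_append, List.map_map]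
    congr 1
    · -- the first counts-1 groups
      apply List.map_congr_left
      intro i hi
      rw [PySem.List.mem_pyRange_one] at hi
      have hb1 : 0 ≤ i * g := mul_nonneg hi.1 hg0
      have hb2 : i * g ≤ (i + 1) * g := by nlinarith [hi.1, hg0]
      have hb3 : (i + 1) * g ≤ (data.length : Int) :=
        le_trans (mul_le_mul_of_nonneg_right (by omega : i + 1 ≤ counts) hg0) hgc
      have e1 : i * g = (((i * g).toNat : Nat) : Int) := by omega
      have e2 : (i + 1) * g = ((((i + 1) * g).toNat : Nat) : Int) := by omega
      simp only [Function.comp_apply]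
      rw [e1, e2, sum_slice data _ _ (by omega), hpren _ (by omega), hpren _ (by omega)]
    · -- the final group
      have hb1 : 0 ≤ (counts - 1) * g := mul_nonneg (by omega) hg0
      have hb3 : (counts - 1) * g ≤ (data.length : Int) :=
        le_trans (mul_le_mul_of_nonneg_right (by omega : counts - 1 ≤ counts) hg0) hgc
      have e1 : (counts - 1) * g = ((((counts - 1) * g).toNat : Nat) : Int) := by omega
      simp only [List.map_cons, List.map_nil]
      rw [e1, hpren ((counts - 1) * g).toNat (by omega), hpren data.length (le_refl _),
        PySem.List.slice_from data (by positivity : (0 : Int) ≤ ((((counts - 1) * g).toNat : Nat) : Int))]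
      rw [List.singleton_inj, sum_drop data _]
      simp
      rw [max_eq_left hb1]
  · -- counts < 0 and data = []
    subst hdata
    have hnil : PySem.List.pyRange 0 (counts - 1) 1 = [] :=
      PySem.List.pyRange_one_eq_nil (by omega)
    have hg : PySem.Int.floordiv 0 counts = 0 := by
      simp [PySem.Int.floordiv]
    simp [hnil, hg, PySem.List.len, PySem.List.slice, PySem.List.pyGetD, PySem.List.pyGet?, PySem.List.pyIdx?]
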